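-- pv_equiv track=rewrite | github.com/rafaelacorreiaoliveira/Slec-osciloscope | recente.py | identify_wave
-- ===== SOURCE A (Python) =====
-- def identify_wave(y, max):
--     """
--         Summary: Identifica o tipo de onda do gráfico, ou seja, se é sinusoidal, retangular ou triangular para podemos
--         calcular corretamente o valor eficaz.
--
--         Args:
--             y (array): array de posições verticais do gráfico
--             max (int): abcissa do primeiro máximo de amplitude encontrado
--
--         Returns:
--             integer: 1,2,3 consoante é sinusoidal, retangular ou triangular, respetivamente
--     """
--     dif_num = 0
--     # se for horizontal, entao o array y so tem 2 valores diferentes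
--     for i in range(len(y)):
--         is_new = True
--         for j in range(i+1, len(y)):
--             if y[i] == y[j]:
--                 is_new = False
--                 break
--         if is_new:
--             dif_num += 1
--     if (dif_num == 2):  # se so tiver 2 valores diferentes
--         return 2  # sinal retangular
--
--     # se for triangular, entao o array y tem um "pico"
--     if (y[max+1] != y[max] and y[max-1] != y[max]):
--         return 3  # sinal triangular
--
--     # se nao for retangular nem triangular, é sinusoidal
--     return 1  # sinal sinusoidal
-- ===== SOURCE B (Python) =====
-- def identify_wave(y, max):
--     # Count distinct values by sorting a copy and scanning adjacent pairs once.
--     s = sorted(y)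
--     dif_num = 0
--     prev = None
--     for v in s:
--         if prev is None or v != prev:
--             dif_num += 1
--         prev = v
--     if dif_num == 2:
--         return 2  # retangular
--     if y[max + 1] != y[max] and y[max - 1] != y[max]:
--         return 3  # triangular
--     return 1  # sinusoidal
-- ===== Notes on version B (the rewrite author's own statement) =====
-- stated objective: faster
-- what changed: Replaces the quadratic nested duplicate-scan over index pairs with sort-a-copy plus a single adjacent-difference scan to count distinct values; the final classification logic is unchanged.
-- outside the precondition, e.g. on identify_wave([5, 5, 5, 6, 7], 10): A raises IndexError, B raises IndexError
import Mathlib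
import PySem

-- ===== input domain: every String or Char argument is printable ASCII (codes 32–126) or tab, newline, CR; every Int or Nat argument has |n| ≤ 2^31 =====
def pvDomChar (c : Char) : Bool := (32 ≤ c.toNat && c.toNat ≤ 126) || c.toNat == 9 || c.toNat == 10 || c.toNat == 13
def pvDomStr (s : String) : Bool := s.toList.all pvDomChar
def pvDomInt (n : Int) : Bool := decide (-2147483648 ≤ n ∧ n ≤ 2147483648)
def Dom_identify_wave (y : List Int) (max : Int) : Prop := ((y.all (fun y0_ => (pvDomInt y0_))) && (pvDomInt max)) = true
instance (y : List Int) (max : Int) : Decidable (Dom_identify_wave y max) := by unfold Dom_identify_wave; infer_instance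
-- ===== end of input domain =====

-- B replaces A's quadratic nested duplicate-scan by sort-a-copy + one adjacent-difference scan (objective: faster).

-- ===== PORT A =====
-- inner loop over j in range(i+1, len(y)) with break: x is y[i], the suffix holds y[i+1:]
def aIsNew (x : Int) : List Int → Bool
  | [] => true
  | j :: rest => if x == j then false else aIsNew x rest

-- outer loop over i in range(len(y)) accumulating dif_num
def aCount : List Int → Int
  | [] => 0
  | x :: t => (if aIsNew x t then 1 else 0) + aCount t

def identify_wave (y : List Int) (max : Int) : Int :=
  if aCount y = 2 then 2
  else
    -- 'y[max+1] != y[max] and y[max-1] != y[max]': Python evaluates y[max+1], y[max] first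
    -- and only reads y[max-1] when the first pair differs (short-circuit); none = IndexError (excluded by Pre_)
    match PySem.List.pyGet? y (max + 1), PySem.List.pyGet? y max with
    | some a, some b =>
        if a ≠ b then
          match PySem.List.pyGet? y (max - 1) with
          | some c => if c ≠ b then 3 else 1
          | none => 0
        else 1
    | _, _ => 0

-- ===== PORT B =====
-- for v in s: if prev is None or v != prev: dif_num += 1; prev = v
def bLoop : Int → Option Int → List Int → Int
  | dif, _, [] => dif
  | dif, prev, v :: rest =>
      bLoop (if prev = none ∨ prev ≠ some v then dif + 1 else dif) (some v) rest

def identify_wave_alt (y : List Int) (max : Int) : Int :=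
  if bLoop 0 none (PySem.List.sorted y (fun x => x) false) = 2 then 2
  else
    -- same short-circuit comparison as the Python; none = IndexError (excluded by Pre_)
    match PySem.List.pyGet? y (max + 1) with
    | none => 0
    | some a =>
      match PySem.List.pyGet? y max with
      | none => 0
      | some b =>
        if a ≠ b then
          match PySem.List.pyGet? y (max - 1) with
          | none => 0
          | some c => if c ≠ b then 3 else 1
        else 1

-- ===== PRECONDITION & SPEC =====
-- Pre_ excludes exactly the inputs where A (and B alike) raises IndexError: dif_num != 2 and
-- an index that Python actually evaluates (max+1, max, and — only when y[max+1] != y[max] — max-1)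
-- falls outside the index range.
def Pre_identify_wave (y : List Int) (max : Int) : Prop :=
  y.dedup.length = 2 ∨
    ((-(y.length : Int) ≤ max + 1 ∧ max + 1 < (y.length : Int)) ∧
     (-(y.length : Int) ≤ max ∧ max < (y.length : Int)) ∧
     (PySem.List.pyGet? y (max + 1) = PySem.List.pyGet? y max ∨
       (-(y.length : Int) ≤ max - 1 ∧ max - 1 < (y.length : Int))))
instance (y : List Int) (max : Int) : Decidable (Pre_identify_wave y max) := by
  unfold Pre_identify_wave; infer_instance

def pvWitness_identify_wave : List Int × Int := ([0, 1, 2, 0, 1], 2)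

def Spec_identify_wave (y : List Int) (max : Int) (out : Int) : Prop := out = identify_wave_alt y max
instance (y : List Int) (max : Int) (out : Int) : Decidable (Spec_identify_wave y max out) := by
  unfold Spec_identify_wave; infer_instance

-- ===== CLAIM (what is proved, stated in full; the proofs are below) =====
def Claim_equal_identify_wave : Prop := ∀ (y : List Int) (max : Int), Dom_identify_wave y max → Pre_identify_wave y max → Spec_identify_wave y max (identify_wave y max)

-- ===== LEMMAS AND PROOFS =====

theorem aIsNew_eq (x : Int) (t : List Int) : aIsNew x t = decide (x ∉ t) := by
  induction t with
  | nil => simp [aIsNew]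
  | cons j rest ih =>
      by_cases h : x = j
      · simp [aIsNew, h]
      · simp [aIsNew, h, ih]

theorem aCount_eq_dedup (y : List Int) : aCount y = (y.dedup.length : Int) := by
  induction y with
  | nil => simp [aCount]
  | cons x t ih =>
      by_cases h : x ∈ t
      · simp [aCount, aIsNew_eq, h, List.dedup_cons_of_mem h, ih]
      · simp [aCount, aIsNew_eq, h, List.dedup_cons_of_notMem h, ih, add_comm]

theorem bLoop_sorted_some (d p : Int) (s : List Int)
    (hs : s.Pairwise (· ≤ ·)) (hp : ∀ x ∈ s, p ≤ x) :
    bLoop d (some p) s = d + (s.dedup.length : Int) - (if p ∈ s then 1 else 0) := by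
  induction s generalizing d p with
  | nil => simp [bLoop]
  | cons v rest ih =>
      have hvr : ∀ x ∈ rest, v ≤ x := fun x hx => (List.pairwise_cons.mp hs).1 x hx
      have hrest : rest.Pairwise (· ≤ ·) := (List.pairwise_cons.mp hs).2
      by_cases hpv : p = v
      · subst hpv
        have h1 : bLoop d (some p) (p :: rest) = bLoop d (some p) rest := by
          simp [bLoop]
        rw [h1, ih d p hrest hvr]
        by_cases hm : p ∈ rest
        · simp [List.dedup_cons_of_mem hm, hm]
        · simp [List.dedup_cons_of_notMem hm, hm]
          ring
      · have hnp : p ∉ v :: rest := by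
          intro hmem
          rcases List.mem_cons.mp hmem with h | h
          · exact hpv h
          · exact hpv (le_antisymm (hp v (List.mem_cons_self ..)) (hvr p h))
        have h1 : bLoop d (some p) (v :: rest) = bLoop (d + 1) (some v) rest := by
          simp [bLoop, hpv]
        rw [h1, ih (d + 1) v hrest hvr]
        by_cases hm : v ∈ rest
        · simp [List.dedup_cons_of_mem hm, hm, hnp]; ring
        · simp [List.dedup_cons_of_notMem hm, hm, hnp]
          ring

theorem bLoop_sorted (s : List Int) (hs : s.Pairwise (· ≤ ·)) :
    bLoop 0 none s = (s.dedup.length : Int) := by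
  cases s with
  | nil => simp [bLoop]
  | cons v rest =>
      have hvr : ∀ x ∈ rest, v ≤ x := fun x hx => (List.pairwise_cons.mp hs).1 x hx
      have h1 : bLoop 0 none (v :: rest) = bLoop 1 (some v) rest := by simp [bLoop]
      rw [h1, bLoop_sorted_some 1 v rest (List.pairwise_cons.mp hs).2 hvr]
      by_cases hm : v ∈ rest
      · simp [List.dedup_cons_of_mem hm, hm]
      · simp [List.dedup_cons_of_notMem hm, hm]
        ring

theorem counts_eq (y : List Int) :
    bLoop 0 none (PySem.List.sorted y (fun x => x) false) = aCount y := by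
  rw [bLoop_sorted _ (by simpa using PySem.List.sorted_pairwise y (fun x => x)),
      aCount_eq_dedup]
  have hperm : (PySem.List.sorted y (fun x => x) false).Perm y := PySem.List.sorted_perm y _ _
  exact_mod_cast hperm.dedup.length_eq

-- ===== VERDICT (by name: the statement is the Claim_ definition above) =====
theorem identify_wave_spec : Claim_equal_identify_wave := by
  intro y max _ _
  unfold Spec_identify_wave identify_wave identify_wave_alt
  rw [counts_eq]
  cases PySem.List.pyGet? y (max + 1) <;>
    cases PySem.List.pyGet? y max <;>
      [skip; skip; skip; split_ifs] <;>
        first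
          | rfl
          | (cases PySem.List.pyGet? y (max - 1) <;> rfl)
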